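-- pv_equiv track=rewrite | github.com/IsmailHosen25/vjudgecontest | AB.py | solve
-- ===== SOURCE A (Python) =====
-- def solve(a, n):
--     leftSum = 0
--     rightSum = 0
--     for i in range(1, n):
--         rightSum += a[i]
--     for i in range(n-1):
--         j = i + 1
--         if leftSum == rightSum:
--             return True
--         leftSum += a[i]
--         rightSum -= a[j]
--     return False
-- ===== SOURCE B (Python) =====
-- def solve(a, n):
--     if n <= 1:
--         return False
--     prefix = [0]
--     for i in range(n):
--         prefix.append(prefix[-1] + a[i])
--     total = prefix[-1]
--     for i in range(n - 1):
--         if prefix[i] == total - prefix[i + 1]: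
--             return True
--     return False
-- ===== Notes on version B (the rewrite author's own statement) =====
-- stated objective: alternative
-- what changed: B first materializes an explicit prefix-sum table (prefix[i] = sum of the first i elements) in one pass, then a separate pass reads the table to test prefix[i] == total - prefix[i+1], instead of A's single interleaved scan maintaining two incremental running sums.
import Mathlib
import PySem

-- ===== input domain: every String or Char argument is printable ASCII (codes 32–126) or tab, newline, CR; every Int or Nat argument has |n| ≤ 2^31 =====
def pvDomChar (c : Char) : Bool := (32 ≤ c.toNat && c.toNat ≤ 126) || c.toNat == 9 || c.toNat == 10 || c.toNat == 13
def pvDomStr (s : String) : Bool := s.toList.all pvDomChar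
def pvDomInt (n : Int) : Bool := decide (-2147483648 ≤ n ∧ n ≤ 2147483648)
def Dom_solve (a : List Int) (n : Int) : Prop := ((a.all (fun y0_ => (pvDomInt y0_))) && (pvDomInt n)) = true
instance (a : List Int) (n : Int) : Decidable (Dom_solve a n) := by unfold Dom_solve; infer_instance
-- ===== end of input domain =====

-- B builds an explicit prefix-sum table in one pass and then scans it, instead of
-- maintaining two incremental running sums; objective: alternative (same O(n) cost).


-- ===== PORT A =====
-- the second loop of A, with early return → structural recursion over the index list
def solveGo (a : List Int) : List Int → Int → Int → Bool
  | [], _, _ => false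
  | i :: rest, leftSum, rightSum =>
    if leftSum == rightSum then true
    else solveGo a rest (leftSum + PySem.List.pyGetD a i 0) (rightSum - PySem.List.pyGetD a (i + 1) 0)

def solve (a : List Int) (n : Int) : Bool :=
  let rightSum := (PySem.List.pyRange 1 n 1).foldl (fun s i => s + PySem.List.pyGetD a i 0) 0
  solveGo a (PySem.List.pyRange 0 (n - 1) 1) 0 rightSum

-- ===== PORT B =====
def solve_alt (a : List Int) (n : Int) : Bool :=
  if n ≤ 1 then false
  else
    let pre := (PySem.List.pyRange 0 n 1).foldl
      (fun p i => p ++ [PySem.List.pyGetD p (-1) 0 + PySem.List.pyGetD a i 0]) [0]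
    let total := PySem.List.pyGetD pre (-1) 0
    (PySem.List.pyRange 0 (n - 1) 1).any
      (fun i => PySem.List.pyGetD pre i 0 == total - PySem.List.pyGetD pre (i + 1) 0)

-- ===== PRECONDITION & SPEC =====
-- A raises IndexError exactly when n ≥ 2 and n > len(a); those inputs are excluded.
def Pre_solve (a : List Int) (n : Int) : Prop := n ≤ (a.length : Int) ∨ n ≤ 1
instance (a : List Int) (n : Int) : Decidable (Pre_solve a n) := by unfold Pre_solve; infer_instance
def pvWitness_solve : List Int × Int := ([1, 2, 1], 3)

def Spec_solve (a : List Int) (n : Int) (out : Bool) : Prop := out = solve_alt a n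
instance (a : List Int) (n : Int) (out : Bool) : Decidable (Spec_solve a n out) := by unfold Spec_solve; infer_instance

-- ===== CLAIM (what is proved, stated in full; the proofs are below) =====
def Claim_equal_solve : Prop := ∀ (a : List Int) (n : Int), Dom_solve a n → Pre_solve a n → Spec_solve a n (solve a n)

-- ===== LEMMAS AND PROOFS =====

-- prefix sums: S a k = sum of the first k elements
def S (a : List Int) (k : Nat) : Int := (a.take k).sum

lemma S_succ (a : List Int) (k : Nat) (h : k < a.length) :
    S a (k + 1) = S a k + a.getD k 0 := by
  simp [S, List.sum_take_succ a k h, List.getD, List.getElem?_eq_getElem h]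

lemma buildPrefix (a : List Int) (m : Nat) (hm : m ≤ a.length) :
    (PySem.List.pyRange 0 (m : Int) 1).foldl
      (fun p i => p ++ [PySem.List.pyGetD p (-1) 0 + PySem.List.pyGetD a i 0]) [0]
    = (List.range (m + 1)).map (S a) := by
  induction m with
  | zero => simp [PySem.List.pyRange_one_eq_nil, S]
  | succ m ih =>
    have h1 : ((m + 1 : Nat) : Int) = (m : Int) + 1 := by push_cast; ring
    rw [h1, PySem.List.pyRange_one_succ_right (by positivity), List.foldl_append,
        ih (by omega)]
    have hlast : PySem.List.pyGetD ((List.range (m + 1)).map (S a)) (-1) 0 = S a m := by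
      rw [List.range_succ, List.map_append]
      exact PySem.List.pyGetD_neg_one_append_singleton _ _ _
    simp only [List.foldl_cons, List.foldl_nil, hlast, PySem.List.pyGetD_natCast]
    rw [List.range_succ (n := m + 1), List.map_append, ← S_succ a m (by omega)]
    simp

lemma lookupPrefix (a : List Int) (m k : Nat) (hk : k ≤ m) :
    PySem.List.pyGetD ((List.range (m + 1)).map (S a)) (k : Int) 0 = S a k := by
  rw [PySem.List.pyGetD_natCast]
  rw [List.getD_eq_getElem _ 0 (by simpa using Nat.lt_succ_of_le hk)]
  simp

lemma totalPrefix (a : List Int) (m : Nat) :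
    PySem.List.pyGetD ((List.range (m + 1)).map (S a)) (-1) 0 = S a m := by
  rw [List.range_succ, List.map_append]
  exact PySem.List.pyGetD_neg_one_append_singleton _ _ _

lemma sumRange (a : List Int) (m : Nat) (h1 : 1 ≤ m) (hm : m ≤ a.length) (c : Int) :
    (PySem.List.pyRange 1 (m : Int) 1).foldl (fun s i => s + PySem.List.pyGetD a i 0) c
    = c + S a m - S a 1 := by
  induction m, h1 using Nat.le_induction with
  | base => simp [PySem.List.pyRange_one_eq_nil]
  | succ m hm1 ih =>
    have h1 : ((m + 1 : Nat) : Int) = (m : Int) + 1 := by push_cast; ring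
    rw [h1, PySem.List.pyRange_one_succ_right (by exact_mod_cast hm1), List.foldl_append,
        ih (by omega)]
    simp only [List.foldl_cons, List.foldl_nil, PySem.List.pyGetD_natCast]
    rw [S_succ a m (by omega)]
    ring

lemma mainLoop (a : List Int) (m : Nat) (hlen : m ≤ a.length) :
    ∀ d k, k < m → m - 1 - k = d →
    solveGo a (PySem.List.pyRange (k : Int) ((m : Int) - 1) 1) (S a k) (S a m - S a (k + 1))
    = (PySem.List.pyRange (k : Int) ((m : Int) - 1) 1).any
        (fun i => PySem.List.pyGetD ((List.range (m + 1)).map (S a)) i 0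
          == S a m - PySem.List.pyGetD ((List.range (m + 1)).map (S a)) (i + 1) 0) := by
  intro d
  induction d with
  | zero =>
    intro k hk hd
    have hnil : PySem.List.pyRange (k : Int) ((m : Int) - 1) 1 = [] :=
      PySem.List.pyRange_one_eq_nil (by omega)
    simp [hnil, solveGo]
  | succ d ih =>
    intro k hk hd
    have hklt : (k : Int) < (m : Int) - 1 := by omega
    rw [PySem.List.pyRange_one_cons hklt]
    have hcast : ((k : Int) + 1) = ((k + 1 : Nat) : Int) := by push_cast; ring
    have e1 : PySem.List.pyGetD ((List.range (m + 1)).map (S a)) (k : Int) 0 = S a k :=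
      lookupPrefix a m k (by omega)
    have e2 : PySem.List.pyGetD ((List.range (m + 1)).map (S a)) ((k : Int) + 1) 0
        = S a (k + 1) := by rw [hcast]; exact lookupPrefix a m (k + 1) (by omega)
    by_cases h : S a k = S a m - S a (k + 1)
    · simp [solveGo, h, e1, e2]
    · have hne : (S a k == S a m - S a (k + 1)) = false := by simpa using h
      simp only [solveGo, hne, List.any_cons, e1, e2, Bool.false_or]
      rw [hcast]
      have s1 : S a k + PySem.List.pyGetD a (k : Int) 0 = S a (k + 1) := by
        rw [PySem.List.pyGetD_natCast, ← S_succ a k (by omega)]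
      have s2 : S a m - S a (k + 1) - PySem.List.pyGetD a ((k + 1 : Nat) : Int) 0
          = S a m - S a (k + 2) := by
        rw [PySem.List.pyGetD_natCast, S_succ a (k + 1) (by omega)]; ring
      rw [s1, s2]
      exact ih (k + 1) (by omega) (by omega)

-- ===== VERDICT (by name: the statement is the Claim_ definition above) =====
theorem solve_spec : Claim_equal_solve := by
  intro a n _ hPre
  unfold Spec_solve solve solve_alt
  by_cases hn : n ≤ 1
  · have hnil : PySem.List.pyRange 0 (n - 1) 1 = [] :=
      PySem.List.pyRange_one_eq_nil (by omega)
    simp [hnil, solveGo, hn]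
  · have hlen : n ≤ (a.length : Int) := by
      rcases hPre with h | h
      · exact h
      · omega
    have hn2 : 2 ≤ n := by omega
    set m := n.toNat with hmdef
    have hmn : (m : Int) = n := Int.toNat_of_nonneg (by omega)
    have hm2 : 2 ≤ m := by omega
    have hmlen : m ≤ a.length := by omega
    rw [if_neg hn]
    simp only [← hmn]
    rw [buildPrefix a m hmlen, totalPrefix a m,
        sumRange a m (by omega) hmlen 0]
    have key := mainLoop a m hmlen (m - 1) 0 (by omega) (by omega)
    have hS0 : S a 0 = 0 := by simp [S]
    simp only [Nat.cast_zero, Nat.zero_add, hS0] at key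
    rw [zero_add]
    exact key
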